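-- pv_equiv track=rewrite | github.com/Camsbury/coderbyte | array_jumping.py | ArrayJumping
-- ===== SOURCE A (Python) =====
-- def ArrayJumping(arr):
--
--     ht = {}
--     max_index = arr.index(max(arr))
--     L = len(arr)
--
--     for i in range(L):
--         ht[i] = (left(L,i,arr[i]),right(L,i,arr[i]))
--
--     if max_index in ht[max_index]:
--         return 1
--
--     travel_set = set(ht[max_index])
--
--     for step in range(2,L+1):
--         for val in tuple(travel_set):
--             travel_set.add(ht[val][0])
--             travel_set.add(ht[val][1])
--         if max_index in travel_set:
--             return step
--     return -1
--
-- def left(length,index,number):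
--     left = number % length
--     if left > index:
--         left = length + index - left
--     else:
--         left = index - left
--     return left
--
-- def right(length,index,number):
--     right = number % length
--     if right > length - index - 1:
--         right = right + index - length
--     else:
--         right = right + index
--     return right
-- ===== SOURCE B (Python) =====
-- def ArrayJumping(arr):
--     L = len(arr)
--     max_index = arr.index(max(arr))
--
--     def targets(i):
--         d = arr[i] % L
--         return (i - d) % L, (i + d) % L
--
--     a, b = targets(max_index)
--     if max_index == a or max_index == b:
--         return 1
--     frontier = [a] + ([b] if b != a else [])
--     visited = set(frontier)
--     for step in range(2, L + 1):
--         new = []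
--         for v in frontier:
--             for t in targets(v):
--                 if t not in visited:
--                     visited.add(t)
--                     new.append(t)
--         if max_index in visited:
--             return step
--         frontier = new
--     return -1
-- ===== Notes on version B (the rewrite author's own statement) =====
-- stated objective: faster
-- what changed: Replaces A's precomputed jump dict plus rounds that re-scan the entire reached set with an on-the-fly frontier BFS that expands only newly reached indices each round.
-- outside the precondition, e.g. on ArrayJumping([]): A raises ValueError, B raises ValueError
import Mathlib
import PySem

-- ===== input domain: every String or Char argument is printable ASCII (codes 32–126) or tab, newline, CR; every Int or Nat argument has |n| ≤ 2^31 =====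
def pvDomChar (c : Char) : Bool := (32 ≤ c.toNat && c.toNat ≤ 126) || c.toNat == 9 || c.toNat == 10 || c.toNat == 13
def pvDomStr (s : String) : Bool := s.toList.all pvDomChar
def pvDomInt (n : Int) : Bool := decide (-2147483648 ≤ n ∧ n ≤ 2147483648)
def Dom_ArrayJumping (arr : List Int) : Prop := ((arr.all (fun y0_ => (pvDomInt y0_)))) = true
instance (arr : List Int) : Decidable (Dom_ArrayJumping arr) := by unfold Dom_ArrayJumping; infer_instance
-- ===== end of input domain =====

-- B replaces A's rescan-the-whole-set rounds by frontier BFS (only newly reached indices are expanded); return value only, no observable mutation.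

-- ===== PORT A =====
def pyLeft (length index number : Int) : Int :=
  let l := PySem.Int.mod number length
  if l > index then length + index - l else index - l

def pyRight (length index number : Int) : Int :=
  let r := PySem.Int.mod number length
  if r > length - index - 1 then r + index - length else r + index

-- A's outer loop over range(2, L+1): each round iterates a snapshot of travel_set,
-- adding both jumps of every member back into the set (order-independent: it only builds a Set).
def aLoop (ht : PySem.Dict Int (Int × Int)) (maxIndex : Int) :
    List Int → PySem.Set Int → Int
  | [], _ => -1
  | step :: rest, travel =>
    let travel' := travel.foldl
      (fun s v => PySem.Set.add (PySem.Set.add s (ht.getD v (0, 0)).1) (ht.getD v (0, 0)).2)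
      travel
    if maxIndex ∈ travel' then step else aLoop ht maxIndex rest travel'

def ArrayJumping (arr : List Int) : Int :=
  match PySem.List.max? arr (fun x => x) with
  | none => 0  -- unreachable: max([]) raises ValueError, excluded by Pre_
  | some m =>
    match PySem.List.index? arr m with
    | none => 0  -- unreachable: m ∈ arr
    | some mi0 =>
      let maxIndex : Int := mi0
      let L : Int := arr.length
      -- ht[i] = (left(L,i,arr[i]), right(L,i,arr[i])) for i in range(L); arr[i] is in range, so pyGetD is exact
      let ht : PySem.Dict Int (Int × Int) :=
        (PySem.List.pyRange 0 L 1).foldl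
          (fun d i => d.insert i
            (pyLeft L i (PySem.List.pyGetD arr i 0), pyRight L i (PySem.List.pyGetD arr i 0)))
          PySem.Dict.empty
      -- ht[val] lookups always hit an existing key, so getD with a junk default is exact
      let t0 := ht.getD maxIndex (0, 0)
      if maxIndex = t0.1 ∨ maxIndex = t0.2 then 1
      else aLoop ht maxIndex (PySem.List.pyRange 2 (L + 1) 1) (PySem.Set.ofList [t0.1, t0.2])

-- ===== PORT B =====
-- (i ± arr[i] % L) mod L, B's closed form of both jump targets
def jumpTargets (arr : List Int) (L i : Int) : Int × Int :=
  let d := PySem.Int.mod (PySem.List.pyGetD arr i 0) L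
  (PySem.Int.mod (i - d) L, PySem.Int.mod (i + d) L)

-- B's BFS rounds: expand only the frontier, collecting unseen targets into `new`
def bLoop (arr : List Int) (L maxIndex : Int) :
    List Int → List Int → PySem.Set Int → Int
  | [], _, _ => -1
  | step :: rest, frontier, visited =>
    let st := frontier.foldl
      (fun st v =>
        let t := jumpTargets arr L v
        let st1 := if t.1 ∈ st.1 then st else (PySem.Set.add st.1 t.1, st.2 ++ [t.1])
        if t.2 ∈ st1.1 then st1 else (PySem.Set.add st1.1 t.2, st1.2 ++ [t.2]))
      (visited, ([] : List Int))
    if maxIndex ∈ st.1 then step else bLoop arr L maxIndex rest st.2 st.1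

def ArrayJumping_alt (arr : List Int) : Int :=
  match PySem.List.max? arr (fun x => x) with
  | none => 0  -- unreachable: max([]) raises ValueError, excluded by Pre_
  | some m =>
    match PySem.List.index? arr m with
    | none => 0  -- unreachable: m ∈ arr
    | some mi0 =>
      let maxIndex : Int := mi0
      let L : Int := arr.length
      let t := jumpTargets arr L maxIndex
      if maxIndex = t.1 ∨ maxIndex = t.2 then 1
      else
        let frontier := [t.1] ++ (if t.2 ≠ t.1 then [t.2] else [])
        bLoop arr L maxIndex (PySem.List.pyRange 2 (L + 1) 1) frontier (PySem.Set.ofList frontier)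

-- ===== PRECONDITION & SPEC =====
-- Pre_ excludes only the empty list, on which A raises ValueError (max of empty sequence).
def Pre_ArrayJumping (arr : List Int) : Prop := arr ≠ []
instance (arr : List Int) : Decidable (Pre_ArrayJumping arr) := by unfold Pre_ArrayJumping; infer_instance
def pvWitness_ArrayJumping : List Int := [2, 1, 3, 1]

def Spec_ArrayJumping (arr : List Int) (out : Int) : Prop := out = ArrayJumping_alt arr
instance (arr : List Int) (out : Int) : Decidable (Spec_ArrayJumping arr out) := by unfold Spec_ArrayJumping; infer_instance

-- ===== CLAIM (what is proved, stated in full; the proofs are below) =====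
def Claim_equal_ArrayJumping : Prop := ∀ (arr : List Int), Dom_ArrayJumping arr → Pre_ArrayJumping arr → Spec_ArrayJumping arr (ArrayJumping arr)

-- ===== LEMMAS AND PROOFS =====

-- membership through A's round: fold adding both components of g v for every v in the snapshot
theorem mem_foldl_add2 (g : Int → Int × Int) :
    ∀ (l : List Int) (s0 : PySem.Set Int) (y : Int),
      (y ∈ l.foldl (fun s v => PySem.Set.add (PySem.Set.add s (g v).1) (g v).2) s0) ↔
        y ∈ s0 ∨ ∃ v ∈ l, y = (g v).1 ∨ y = (g v).2 := by
  intro l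
  induction l with
  | nil => simp
  | cons a l ih =>
    intro s0 y
    simp only [List.foldl_cons, ih, PySem.Set.mem_add, List.mem_cons]
    aesop

-- membership through one step of B's inner loop
theorem bstep_mem (arr : List Int) (L : Int) (st : PySem.Set Int × List Int) (v : Int) :
    (∀ y, y ∈ ((fun st v =>
        let t := jumpTargets arr L v
        let st1 := if t.1 ∈ st.1 then st else (PySem.Set.add st.1 t.1, st.2 ++ [t.1])
        if t.2 ∈ st1.1 then st1 else (PySem.Set.add st1.1 t.2, st1.2 ++ [t.2]))
          st v).1 ↔ y ∈ st.1 ∨ y = (jumpTargets arr L v).1 ∨ y = (jumpTargets arr L v).2) ∧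
    (∀ y, y ∈ ((fun st v =>
        let t := jumpTargets arr L v
        let st1 := if t.1 ∈ st.1 then st else (PySem.Set.add st.1 t.1, st.2 ++ [t.1])
        if t.2 ∈ st1.1 then st1 else (PySem.Set.add st1.1 t.2, st1.2 ++ [t.2]))
          st v).2 ↔ y ∈ st.2 ∨
            (y ∈ ((fun st v =>
              let t := jumpTargets arr L v
              let st1 := if t.1 ∈ st.1 then st else (PySem.Set.add st.1 t.1, st.2 ++ [t.1])
              if t.2 ∈ st1.1 then st1 else (PySem.Set.add st1.1 t.2, st1.2 ++ [t.2]))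
                st v).1 ∧ y ∉ st.1)) := by
  dsimp only
  split_ifs with h1 h2 h2 <;>
    refine ⟨fun y => ?_, fun y => ?_⟩ <;>
    (try simp only [PySem.Set.mem_add, List.mem_append, List.mem_singleton] at *) <;>
    aesop

-- B's whole inner round: first components collect the targets of the frontier,
-- second components are exactly what is new relative to V0
theorem b_fold (arr : List Int) (L : Int) (V0 : PySem.Set Int) (N0 : List Int) :
    ∀ (l : List Int) (st : PySem.Set Int × List Int),
      (∀ y, y ∈ V0 → y ∈ st.1) →
      (∀ y, y ∈ st.2 ↔ y ∈ N0 ∨ (y ∈ st.1 ∧ y ∉ V0)) →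
      (∀ y, y ∈ (l.foldl (fun st v =>
          let t := jumpTargets arr L v
          let st1 := if t.1 ∈ st.1 then st else (PySem.Set.add st.1 t.1, st.2 ++ [t.1])
          if t.2 ∈ st1.1 then st1 else (PySem.Set.add st1.1 t.2, st1.2 ++ [t.2])) st).1 ↔
        y ∈ st.1 ∨ ∃ v ∈ l, y = (jumpTargets arr L v).1 ∨ y = (jumpTargets arr L v).2) ∧
      (∀ y, y ∈ V0 → y ∈ (l.foldl (fun st v =>
          let t := jumpTargets arr L v
          let st1 := if t.1 ∈ st.1 then st else (PySem.Set.add st.1 t.1, st.2 ++ [t.1])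
          if t.2 ∈ st1.1 then st1 else (PySem.Set.add st1.1 t.2, st1.2 ++ [t.2])) st).1) ∧
      (∀ y, y ∈ (l.foldl (fun st v =>
          let t := jumpTargets arr L v
          let st1 := if t.1 ∈ st.1 then st else (PySem.Set.add st.1 t.1, st.2 ++ [t.1])
          if t.2 ∈ st1.1 then st1 else (PySem.Set.add st1.1 t.2, st1.2 ++ [t.2])) st).2 ↔
        y ∈ N0 ∨ (y ∈ (l.foldl (fun st v =>
          let t := jumpTargets arr L v
          let st1 := if t.1 ∈ st.1 then st else (PySem.Set.add st.1 t.1, st.2 ++ [t.1])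
          if t.2 ∈ st1.1 then st1 else (PySem.Set.add st1.1 t.2, st1.2 ++ [t.2])) st).1 ∧ y ∉ V0)) := by
  intro l
  induction l with
  | nil =>
    intro st hV hN
    exact ⟨by simp, by simpa using hV, by simpa using hN⟩
  | cons a l ih =>
    intro st hV hN
    obtain ⟨hs1, hs2⟩ := bstep_mem arr L st a
    have hV' : ∀ y, y ∈ V0 → y ∈ ((fun st v =>
        let t := jumpTargets arr L v
        let st1 := if t.1 ∈ st.1 then st else (PySem.Set.add st.1 t.1, st.2 ++ [t.1])
        if t.2 ∈ st1.1 then st1 else (PySem.Set.add st1.1 t.2, st1.2 ++ [t.2])) st a).1 := by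
      intro y hy; exact (hs1 y).2 (Or.inl (hV y hy))
    have hN' : ∀ y, y ∈ ((fun st v =>
        let t := jumpTargets arr L v
        let st1 := if t.1 ∈ st.1 then st else (PySem.Set.add st.1 t.1, st.2 ++ [t.1])
        if t.2 ∈ st1.1 then st1 else (PySem.Set.add st1.1 t.2, st1.2 ++ [t.2])) st a).2 ↔
        y ∈ N0 ∨ (y ∈ ((fun st v =>
        let t := jumpTargets arr L v
        let st1 := if t.1 ∈ st.1 then st else (PySem.Set.add st.1 t.1, st.2 ++ [t.1])
        if t.2 ∈ st1.1 then st1 else (PySem.Set.add st1.1 t.2, st1.2 ++ [t.2])) st a).1 ∧ y ∉ V0) := by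
      intro y
      rw [hs2 y, hN y]
      constructor
      · rintro ((h | ⟨h1, h2⟩) | ⟨h1, h2⟩)
        · exact Or.inl h
        · exact Or.inr ⟨(hs1 y).2 (Or.inl h1), h2⟩
        · exact Or.inr ⟨h1, fun hy => h2 (hV y hy)⟩
      · rintro (h | ⟨h1, h2⟩)
        · exact Or.inl (Or.inl h)
        · by_cases hy : y ∈ st.1
          · exact Or.inl (Or.inr ⟨hy, h2⟩)
          · exact Or.inr ⟨h1, hy⟩
    obtain ⟨ih1, ih2, ih3⟩ := ih _ hV' hN'
    refine ⟨?_, ?_, ?_⟩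
    · intro y
      rw [List.foldl_cons, ih1, hs1 y]
      simp only [List.mem_cons]
      aesop
    · intro y hy
      rw [List.foldl_cons]
      exact ih2 y hy
    · intro y
      rw [List.foldl_cons]
      exact ih3 y


-- the dict built by A's first loop, looked up
theorem getD_fold_insert (f : Int → Int × Int) :
    ∀ (l : List Int) (d : PySem.Dict Int (Int × Int)) (v : Int),
      ((l.foldl (fun d i => d.insert i (f i)) d).getD v ((0 : Int), (0 : Int))) =
        if v ∈ l then f v else d.getD v ((0 : Int), (0 : Int)) := by
  intro l
  induction l with
  | nil => simp
  | cons a l ih =>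
    intro d v
    rw [List.foldl_cons, ih]
    by_cases hv : v ∈ l
    · simp [hv]
    · rw [PySem.Dict.getD_insert]
      by_cases hva : v = a <;> simp [hva, hv]

-- A's branchy left/right are B's (i ∓ d) mod L
theorem targets_eq (arr : List Int) (L : Int) (hL : 0 < L) (i : Int) (h0 : 0 ≤ i) (h1 : i < L) :
    jumpTargets arr L i =
      (pyLeft L i (PySem.List.pyGetD arr i 0), pyRight L i (PySem.List.pyGetD arr i 0)) := by
  unfold jumpTargets pyLeft pyRight
  have hd0 : 0 ≤ PySem.Int.mod (PySem.List.pyGetD arr i 0) L := PySem.Int.mod_nonneg _ hL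
  have hd1 : PySem.Int.mod (PySem.List.pyGetD arr i 0) L < L := PySem.Int.mod_lt _ hL
  set d := PySem.Int.mod (PySem.List.pyGetD arr i 0) L with hd
  dsimp only
  rw [PySem.Int.mod_eq_emod_of_pos hL, PySem.Int.mod_eq_emod_of_pos hL]
  simp only [Prod.mk.injEq]
  refine ⟨?_, ?_⟩
  · split_ifs with h
    · rw [show i - d = (L + i - d) + L * (-1) by ring, Int.add_mul_emod_self_left]
      exact Int.emod_eq_of_lt (by omega) (by omega)
    · exact Int.emod_eq_of_lt (by omega) (by omega)
  · split_ifs with h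
    · rw [show i + d = (d + i - L) + L * 1 by ring, Int.add_mul_emod_self_left]
      exact Int.emod_eq_of_lt (by omega) (by omega)
    · rw [show i + d = d + i by ring]
      exact Int.emod_eq_of_lt (by omega) (by omega)

theorem targets_range (arr : List Int) (L : Int) (hL : 0 < L) (i : Int) :
    (0 ≤ (jumpTargets arr L i).1 ∧ (jumpTargets arr L i).1 < L) ∧
    (0 ≤ (jumpTargets arr L i).2 ∧ (jumpTargets arr L i).2 < L) := by
  unfold jumpTargets
  exact ⟨⟨PySem.Int.mod_nonneg _ hL, PySem.Int.mod_lt _ hL⟩,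
         ⟨PySem.Int.mod_nonneg _ hL, PySem.Int.mod_lt _ hL⟩⟩

-- round-by-round equivalence: A's full-set rescan and B's frontier expansion reach the
-- same set of indices, hence return on the same step
theorem loop_eq (arr : List Int) (L mi : Int) (ht : PySem.Dict Int (Int × Int))
    (hht : ∀ v : Int, 0 ≤ v → v < L → ht.getD v (0, 0) = jumpTargets arr L v)
    (hrange : ∀ v : Int,
      (0 ≤ (jumpTargets arr L v).1 ∧ (jumpTargets arr L v).1 < L) ∧
      (0 ≤ (jumpTargets arr L v).2 ∧ (jumpTargets arr L v).2 < L)) :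
    ∀ (steps : List Int) (S : PySem.Set Int) (frontier : List Int) (visited : PySem.Set Int),
    (∀ x, x ∈ S ↔ x ∈ visited) →
    (∀ x ∈ frontier, x ∈ visited) →
    (∀ v ∈ visited, v ∉ frontier →
      (jumpTargets arr L v).1 ∈ visited ∧ (jumpTargets arr L v).2 ∈ visited) →
    mi ∉ visited →
    (∀ v ∈ visited, 0 ≤ v ∧ v < L) →
    aLoop ht mi steps S = bLoop arr L mi steps frontier visited := by
  intro steps
  induction steps with
  | nil => intro S frontier visited _ _ _ _ _; rfl
  | cons step rest ih =>
    intro S frontier visited hSV hFV hClose hmi hBnd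
    rw [aLoop, bLoop]
    have hA := mem_foldl_add2 (fun v => ht.getD v (0, 0)) S S
    obtain ⟨hb1, hb2, hb3⟩ :=
      b_fold arr L visited [] frontier (visited, ([] : List Int))
        (fun y hy => hy) (by simp)
    -- membership in A's new set ↔ membership in B's new visited set
    have hmem : ∀ x,
        (x ∈ S.foldl (fun s v =>
          PySem.Set.add (PySem.Set.add s (ht.getD v (0, 0)).1) (ht.getD v (0, 0)).2) S) ↔
        x ∈ (frontier.foldl (fun st v =>
          let t := jumpTargets arr L v
          let st1 := if t.1 ∈ st.1 then st else (PySem.Set.add st.1 t.1, st.2 ++ [t.1])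
          if t.2 ∈ st1.1 then st1 else (PySem.Set.add st1.1 t.2, st1.2 ++ [t.2]))
          (visited, ([] : List Int))).1 := by
      intro x
      rw [hA x, hb1 x]
      constructor
      · rintro (hx | ⟨v, hvS, hx⟩)
        · exact Or.inl ((hSV x).1 hx)
        · have hvV : v ∈ visited := (hSV v).1 hvS
          obtain ⟨hv0, hv1⟩ := hBnd v hvV
          rw [hht v hv0 hv1] at hx
          by_cases hvF : v ∈ frontier
          · exact Or.inr ⟨v, hvF, hx⟩
          · obtain ⟨hc1, hc2⟩ := hClose v hvV hvF
            rcases hx with rfl | rfl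
            · exact Or.inl hc1
            · exact Or.inl hc2
      · rintro (hx | ⟨v, hvF, hx⟩)
        · exact Or.inl ((hSV x).2 hx)
        · have hvV : v ∈ visited := hFV v hvF
          obtain ⟨hv0, hv1⟩ := hBnd v hvV
          refine Or.inr ⟨v, (hSV v).2 hvV, ?_⟩
          rw [hht v hv0 hv1]
          exact hx
    by_cases hin : mi ∈ (frontier.foldl (fun st v =>
          let t := jumpTargets arr L v
          let st1 := if t.1 ∈ st.1 then st else (PySem.Set.add st.1 t.1, st.2 ++ [t.1])
          if t.2 ∈ st1.1 then st1 else (PySem.Set.add st1.1 t.2, st1.2 ++ [t.2]))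
          (visited, ([] : List Int))).1
    · rw [if_pos ((hmem mi).2 hin), if_pos hin]
    · rw [if_neg (fun h => hin ((hmem mi).1 h)), if_neg hin]
      refine ih _ _ _ hmem (fun x hx => (hb3 x).1 hx |>.elim (by simp) And.left) ?_ hin ?_
      · intro v hv1 hv2
        have hvV : v ∈ visited := by
          rcases (hb3 v).2 ∘ Or.inr |>.mt hv2 |> not_and_or.mp with h | h
          · exact absurd hv1 h
          · exact not_not.mp h
        by_cases hvF : v ∈ frontier
        · exact ⟨(hb1 _).2 (Or.inr ⟨v, hvF, Or.inl rfl⟩), (hb1 _).2 (Or.inr ⟨v, hvF, Or.inr rfl⟩)⟩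
        · obtain ⟨hc1, hc2⟩ := hClose v hvV hvF
          exact ⟨hb2 _ hc1, hb2 _ hc2⟩
      · intro v hv
        rcases (hb1 v).1 hv with hvV | ⟨w, _, rfl | rfl⟩
        · exact hBnd v hvV
        · exact (hrange w).1
        · exact (hrange w).2

-- ===== VERDICT (by name: the statement is the Claim_ definition above) =====
theorem ArrayJumping_spec : Claim_equal_ArrayJumping := by
  intro arr _ hpre
  unfold Spec_ArrayJumping
  obtain ⟨m, hm⟩ : ∃ m, PySem.List.max? arr (fun x => x) = some m := by
    cases h : PySem.List.max? arr (fun x => x)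
    · exact absurd ((PySem.List.max?_eq_none_iff arr (fun x => x)).mp h) hpre
    · exact ⟨_, rfl⟩
  have hmemm : m ∈ arr := PySem.List.max?_mem hm
  obtain ⟨k, hk⟩ : ∃ k, PySem.List.index? arr m = some k := by
    cases h : PySem.List.index? arr m
    · exact absurd hmemm ((PySem.List.index?_eq_none_iff arr m).mp h)
    · exact ⟨_, rfl⟩
  obtain ⟨hklt, -, -⟩ := PySem.List.getElem_of_index?_eq_some hk
  have hL : 0 < (arr.length : Int) := by omega
  have hk0 : (0 : Int) ≤ (k : Int) := Int.natCast_nonneg k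
  have hkL : ((k : Nat) : Int) < (arr.length : Int) := by exact_mod_cast hklt
  simp only [ArrayJumping, ArrayJumping_alt, hm, hk]
  have hht : ∀ v : Int, 0 ≤ v → v < (arr.length : Int) →
      (((PySem.List.pyRange 0 (arr.length : Int) 1).foldl
        (fun d i => d.insert i
          (pyLeft (arr.length : Int) i (PySem.List.pyGetD arr i 0),
           pyRight (arr.length : Int) i (PySem.List.pyGetD arr i 0)))
        PySem.Dict.empty).getD v (0, 0)) = jumpTargets arr (arr.length : Int) v := by
    intro v h0 h1
    rw [getD_fold_insert (fun i =>
      (pyLeft (arr.length : Int) i (PySem.List.pyGetD arr i 0),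
       pyRight (arr.length : Int) i (PySem.List.pyGetD arr i 0)))]
    rw [if_pos (PySem.List.mem_pyRange_one.mpr ⟨h0, h1⟩)]
    exact (targets_eq arr _ hL v h0 h1).symm
  rw [hht (k : Int) hk0 hkL]
  set T := jumpTargets arr (arr.length : Int) (k : Int) with hT
  by_cases hg : ((k : Nat) : Int) = T.1 ∨ ((k : Nat) : Int) = T.2
  · rw [if_pos hg, if_pos hg]
  · rw [if_neg hg, if_neg hg]
    have hfmem : ∀ x : Int, (x ∈ [T.1] ++ (if T.2 ≠ T.1 then [T.2] else [])) ↔ (x = T.1 ∨ x = T.2) := by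
      intro x
      by_cases h21 : T.2 = T.1 <;> simp [h21]
    have hvmem : ∀ x : Int,
        (x ∈ PySem.Set.ofList ([T.1] ++ (if T.2 ≠ T.1 then [T.2] else []))) ↔ (x = T.1 ∨ x = T.2) := by
      intro x; rw [PySem.Set.mem_ofList]; exact hfmem x
    refine loop_eq arr (arr.length : Int) ((k : Nat) : Int) _ hht
      (fun v => targets_range arr _ hL v) _ _ _ _ ?_ ?_ ?_ ?_ ?_
    · intro x
      rw [PySem.Set.mem_ofList, hvmem x]
      simp
    · intro x hx
      exact (hvmem x).2 ((hfmem x).1 hx)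
    · intro v hv hvF
      exact absurd ((hfmem v).2 ((hvmem v).1 hv)) hvF
    · intro h
      exact hg ((hvmem _).1 h)
    · intro v hv
      rcases (hvmem v).1 hv with rfl | rfl
      · exact ⟨(targets_range arr _ hL _).1.1, (targets_range arr _ hL _).1.2⟩
      · exact ⟨(targets_range arr _ hL _).2.1, (targets_range arr _ hL _).2.2⟩
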